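-- pv_equiv track=rewrite | github.com/IgnacioCJuv/sion | Ejercicios_Led.py | contar_leds
-- ===== SOURCE A (Python) =====
-- def contar_leds(numero):
--     total_leds = 0
--     while (numero > 0):
--         unidad = numero % 10
--         if(unidad == 1):
--             total_leds += 2
--         elif(unidad == 2 or unidad == 3 or unidad == 5):
--             total_leds += 5
--         elif(unidad == 4):
--             total_leds +=4
--         elif(unidad == 6 or unidad == 9 or unidad == 0):
--             total_leds += 6
--         elif(unidad == 7):
--             total_leds += 3
--         elif(unidad == 8):
--             total_leds +=7
--         numero = numero // 10
--     return total_leds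
-- ===== SOURCE B (Python) =====
-- _LED = {'0': 6, '1': 2, '2': 5, '3': 5, '4': 4, '5': 5, '6': 6, '7': 3, '8': 7, '9': 6}
--
-- def contar_leds(numero):
--     if numero <= 0:
--         return 0
--     return sum(_LED[c] for c in str(numero))
-- ===== Notes on version B (the rewrite author's own statement) =====
-- stated objective: idiomatic
-- what changed: replaces the while-loop doing repeated modulo/floor-division digit extraction with an if/elif chain by a digit-to-segment lookup table summed over the decimal string of the number
import Mathlib
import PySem

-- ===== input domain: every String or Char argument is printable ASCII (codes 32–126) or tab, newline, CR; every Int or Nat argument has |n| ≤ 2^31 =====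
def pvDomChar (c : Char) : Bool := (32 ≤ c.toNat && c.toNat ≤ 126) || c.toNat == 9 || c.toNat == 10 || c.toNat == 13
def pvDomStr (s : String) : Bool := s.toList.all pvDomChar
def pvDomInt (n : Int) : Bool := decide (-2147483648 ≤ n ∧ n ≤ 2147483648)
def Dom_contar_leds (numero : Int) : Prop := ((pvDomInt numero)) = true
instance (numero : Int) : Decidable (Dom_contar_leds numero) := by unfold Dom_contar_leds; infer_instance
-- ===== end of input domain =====

-- B replaces A's while-loop of modulo/floor-division digit extraction and its elif chain by a
-- digit-char -> segment-count lookup table summed over the decimal string (idiomatic).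


-- ===== PORT A =====
-- the while-loop of A, state = (numero, total_leds)
def contar_leds_go (numero total_leds : Int) : Int :=
  if h : numero > 0 then
    let unidad := PySem.Int.mod numero 10
    let total' :=
      if unidad = 1 then total_leds + 2
      else if unidad = 2 ∨ unidad = 3 ∨ unidad = 5 then total_leds + 5
      else if unidad = 4 then total_leds + 4
      else if unidad = 6 ∨ unidad = 9 ∨ unidad = 0 then total_leds + 6
      else if unidad = 7 then total_leds + 3
      else if unidad = 8 then total_leds + 7
      else total_leds
    contar_leds_go (PySem.Int.floordiv numero 10) total'
  else total_leds
termination_by numero.toNat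
decreasing_by
  simp only [PySem.Int.floordiv, Int.fdiv_eq_ediv]
  omega

def contar_leds (numero : Int) : Int := contar_leds_go numero 0

-- ===== PORT B =====
def ledTable : PySem.Dict Char Int :=
  PySem.Dict.ofList
    [('0', 6), ('1', 2), ('2', 5), ('3', 5), ('4', 4),
     ('5', 5), ('6', 6), ('7', 3), ('8', 7), ('9', 6)]

def contar_leds_alt (numero : Int) : Int :=
  if numero ≤ 0 then 0
  else (((PySem.Int.toStr numero).toList).map (fun c => ledTable.getD c 0)).sum

-- ===== PRECONDITION & SPEC =====
def Spec_contar_leds (numero : Int) (out : Int) : Prop := out = contar_leds_alt numero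
instance (numero : Int) (out : Int) : Decidable (Spec_contar_leds numero out) := by unfold Spec_contar_leds; infer_instance

-- ===== CLAIM (what is proved, stated in full; the proofs are below) =====
def Claim_equal_contar_leds : Prop := ∀ (numero : Int), Dom_contar_leds numero → Spec_contar_leds numero (contar_leds numero)

-- ===== LEMMAS AND PROOFS =====

-- segment count of the char of a digit, through B's table
def tseg (d : Nat) : Int := ledTable.getD (Nat.digitChar d) 0

-- digit sum as produced by Nat.toDigits' structure (n has at least one digit)
def segNat (n : Nat) : Int :=
  if n < 10 then tseg n else tseg (n % 10) + segNat (n / 10)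
termination_by n
decreasing_by omega

lemma segNat_small {n : Nat} (h : n < 10) : segNat n = tseg n := by
  rw [segNat]; simp [h]

lemma segNat_big {n : Nat} (h : ¬ n < 10) : segNat n = tseg (n % 10) + segNat (n / 10) := by
  rw [segNat]; simp [h]

-- sum of B's table over Nat.toDigitsCore
lemma sum_toDigitsCore : ∀ (fuel n : Nat) (ds : List Char), n < fuel →
    ((Nat.toDigitsCore 10 fuel n ds).map (fun c => ledTable.getD c 0)).sum
      = segNat n + ((ds.map (fun c => ledTable.getD c 0)).sum) := by
  intro fuel
  induction fuel with
  | zero => intro n ds h; omega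
  | succ fuel ih =>
    intro n ds h
    rw [Nat.toDigitsCore]
    by_cases h10 : n / 10 = 0
    · have hn : n < 10 := by omega
      simp only [h10, segNat_small hn]
      have : n % 10 = n := Nat.mod_eq_of_lt hn
      rw [this]
      rfl
    · have hn : ¬ n < 10 := by omega
      rw [if_neg h10, ih (n / 10) _ (by omega)]
      simp only [List.map_cons, List.sum_cons, segNat_big hn, tseg]
      ring

-- loop digit sum (value 0 at 0, matching A's while-loop)
def segLoop (m : Nat) : Int :=
  if m = 0 then 0 else tseg (m % 10) + segLoop (m / 10)
termination_by m
decreasing_by omega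

lemma segLoop_eq_segNat : ∀ m : Nat, 0 < m → segLoop m = segNat m := by
  intro m
  induction m using Nat.strong_induction_on with
  | _ m ih =>
    intro hm
    rw [segLoop, if_neg (by omega)]
    by_cases h10 : m < 10
    · rw [segNat_small h10, Nat.div_eq_of_lt h10, segLoop, if_pos rfl,
        Nat.mod_eq_of_lt h10]
      ring
    · rw [segNat_big h10, ih (m / 10) (by omega) (by omega)]

-- A's per-digit elif chain adds exactly B's table value
lemma chain_eq (u acc : Int) (h0 : 0 ≤ u) (h9 : u < 10) :
    (if u = 1 then acc + 2
     else if u = 2 ∨ u = 3 ∨ u = 5 then acc + 5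
     else if u = 4 then acc + 4
     else if u = 6 ∨ u = 9 ∨ u = 0 then acc + 6
     else if u = 7 then acc + 3
     else if u = 8 then acc + 7
     else acc) = acc + tseg u.toNat := by
  interval_cases u <;> · show _ = acc + tseg _; norm_num [tseg]; try decide

lemma go_eq : ∀ (k : Nat) (n acc : Int), n.toNat ≤ k →
    contar_leds_go n acc = acc + (if 0 < n then segLoop n.toNat else 0) := by
  intro k
  induction k with
  | zero =>
    intro n acc h
    rw [contar_leds_go.eq_def]
    have : ¬ n > 0 := by omega
    simp [this]
  | succ k ih =>
    intro n acc h
    rw [contar_leds_go.eq_def]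
    by_cases hn : n > 0
    · rw [dif_pos hn]
      have hmod : PySem.Int.mod n 10 = n % 10 := by
        simp [PySem.Int.mod, Int.fmod_eq_emod]
      have hdiv : PySem.Int.floordiv n 10 = n / 10 := by
        simp [PySem.Int.floordiv, Int.fdiv_eq_ediv]
      simp only [hmod, hdiv]
      rw [chain_eq (n % 10) acc (by omega) (by omega)]
      rw [ih (n / 10) _ (by omega)]
      have h1 : (n % 10).toNat = n.toNat % 10 := by omega
      have h2 : (n / 10).toNat = n.toNat / 10 := by omega
      rw [if_pos hn, h1, h2]
      conv_rhs => rw [segLoop, if_neg (show ¬ n.toNat = 0 by omega)]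
      by_cases hq : 0 < n / 10
      · rw [if_pos hq]; ring
      · have h0 : n.toNat / 10 = 0 := by omega
        rw [if_neg hq, h0, segLoop, if_pos rfl]; ring
    · rw [dif_neg hn, if_neg (by omega)]; ring

lemma toChars_pos (n : Int) (hn : 0 < n) :
    PySem.Int.toChars n = Nat.toDigits 10 n.toNat := by
  simp only [PySem.Int.toChars, if_neg (by omega : ¬ n < 0)]

-- ===== VERDICT (by name: the statement is the Claim_ definition above) =====
theorem contar_leds_spec : Claim_equal_contar_leds := by
  intro n _
  unfold Spec_contar_leds contar_leds contar_leds_alt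
  by_cases hn : 0 < n
  · rw [if_neg (by omega : ¬ n ≤ 0)]
    rw [go_eq n.toNat n 0 le_rfl, if_pos hn, PySem.Int.toList_toStr, toChars_pos n hn]
    rw [Nat.toDigits, sum_toDigitsCore (n.toNat + 1) n.toNat [] (by omega)]
    rw [segLoop_eq_segNat n.toNat (by omega)]
    simp
  · rw [if_pos (by omega : n ≤ 0), go_eq n.toNat n 0 le_rfl, if_neg hn]
    ring
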